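-- pv_equiv track=rewrite | github.com/omniwaifu/dere | src/dere_graph/dere_graph/graph.py | _extend_seed_uuids
-- ===== SOURCE A (Python) =====
-- def _extend_seed_uuids(seeds: list[str], extras: list[str], limit: int) -> list[str]:
--     if limit <= 0:
--         return []
--
--     seen = set(seeds)
--     for uuid in extras:
--         if len(seeds) >= limit:
--             break
--         if uuid in seen:
--             continue
--         seeds.append(uuid)
--         seen.add(uuid)
--
--     return seeds
-- ===== SOURCE B (Python) =====
-- def _extend_seed_uuids(seeds: list[str], extras: list[str], limit: int) -> list[str]:
--     if limit <= 0:
--         return []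
--
--     seen = set(seeds)
--     novel = []
--     for uuid in extras:
--         if uuid not in seen:
--             seen.add(uuid)
--             novel.append(uuid)
--
--     needed = limit - len(seeds)
--     if needed > 0:
--         seeds.extend(novel[:needed])
--     return seeds
-- ===== Notes on version B (the rewrite author's own statement) =====
-- stated objective: alternative
-- what changed: Replaces A's interleaved append-with-early-break loop by a full dedup filter pass building 'novel', then a single slice-and-extend of seeds by 'limit - len(seeds)' elements.
import Mathlib
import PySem

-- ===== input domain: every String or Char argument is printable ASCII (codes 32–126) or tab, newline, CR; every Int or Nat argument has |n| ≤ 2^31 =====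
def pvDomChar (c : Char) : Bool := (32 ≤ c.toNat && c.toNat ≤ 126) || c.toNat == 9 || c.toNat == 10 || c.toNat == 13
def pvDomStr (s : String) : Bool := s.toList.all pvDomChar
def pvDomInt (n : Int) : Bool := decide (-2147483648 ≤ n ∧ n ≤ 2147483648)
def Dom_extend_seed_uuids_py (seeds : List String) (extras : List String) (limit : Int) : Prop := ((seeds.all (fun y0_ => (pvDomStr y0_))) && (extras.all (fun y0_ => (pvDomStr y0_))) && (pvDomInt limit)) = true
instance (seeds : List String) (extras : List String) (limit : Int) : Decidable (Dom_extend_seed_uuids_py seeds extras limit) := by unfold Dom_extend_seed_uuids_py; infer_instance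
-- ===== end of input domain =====

-- B interleaves the dedup filter with a separate slice-and-extend; A appends with an early break.
-- Equivalence is about the RETURN value; Python A mutates `seeds` in place (B performs the same mutation).

-- ===== PORT A =====
-- the 'for uuid in extras' loop with its early 'break', carrying (seeds, seen)
def pvALoop (limit : Int) (seeds : List String) (seen : PySem.Set String) : List String → List String
  | [] => seeds
  | u :: rest =>
    if limit ≤ (seeds.length : Int) then seeds
    else if PySem.Set.contains seen u then pvALoop limit seeds seen rest
    else pvALoop limit (seeds ++ [u]) (PySem.Set.add seen u) rest

def extend_seed_uuids_py (seeds : List String) (extras : List String) (limit : Int) : List String :=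
  if limit ≤ 0 then []
  else pvALoop limit seeds (PySem.Set.ofList seeds) extras

-- ===== PORT B =====
-- the filter pass: every extra not yet seen, in order
def pvNovel (seen : PySem.Set String) : List String → List String
  | [] => []
  | u :: rest =>
    if PySem.Set.contains seen u then pvNovel seen rest
    else u :: pvNovel (PySem.Set.add seen u) rest

def extend_seed_uuids_py_alt (seeds : List String) (extras : List String) (limit : Int) : List String :=
  if limit ≤ 0 then []
  else
    let novel := pvNovel (PySem.Set.ofList seeds) extras
    let needed := limit - (seeds.length : Int)
    if 0 < needed then seeds ++ novel.take needed.toNat else seeds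

-- ===== PRECONDITION & SPEC =====
def Spec_extend_seed_uuids_py (seeds : List String) (extras : List String) (limit : Int) (out : List String) : Prop := out = extend_seed_uuids_py_alt seeds extras limit
instance (seeds : List String) (extras : List String) (limit : Int) (out : List String) : Decidable (Spec_extend_seed_uuids_py seeds extras limit out) := by unfold Spec_extend_seed_uuids_py; infer_instance

-- ===== CLAIM (what is proved, stated in full; the proofs are below) =====
def Claim_equal_extend_seed_uuids_py : Prop := ∀ (seeds : List String) (extras : List String) (limit : Int), Dom_extend_seed_uuids_py seeds extras limit → Spec_extend_seed_uuids_py seeds extras limit (extend_seed_uuids_py seeds extras limit)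

-- ===== LEMMAS AND PROOFS =====

-- A's break-at-limit loop is: append the first (limit - len seeds) novel extras.
theorem pvALoop_eq_take (limit : Int) (extras : List String) :
    ∀ (seeds : List String) (seen : PySem.Set String),
      pvALoop limit seeds seen extras =
        seeds ++ (pvNovel seen extras).take (limit - (seeds.length : Int)).toNat := by
  induction extras with
  | nil => intro seeds seen; simp [pvALoop, pvNovel]
  | cons u rest ih =>
    intro seeds seen
    by_cases hlim : limit ≤ (seeds.length : Int)
    · have : (limit - (seeds.length : Int)).toNat = 0 := by omega
      simp [pvALoop, hlim, this]
    · by_cases hmem : u ∈ seen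
      · simp [pvALoop, pvNovel, hlim, hmem, ih]
      · have htn : (limit - (seeds.length : Int)).toNat
            = (limit - ((seeds.length : Int) + 1)).toNat + 1 := by omega
        simp only [pvALoop, pvNovel, ih]
        rw [htn]
        simp [hlim, hmem, List.take_succ_cons]

-- ===== VERDICT (by name: the statement is the Claim_ definition above) =====
theorem extend_seed_uuids_py_spec : Claim_equal_extend_seed_uuids_py := by
  intro seeds extras limit _
  unfold Spec_extend_seed_uuids_py extend_seed_uuids_py extend_seed_uuids_py_alt
  by_cases h0 : limit ≤ 0
  · simp [h0]
  · simp only [h0, if_false]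
    rw [pvALoop_eq_take]
    split_ifs with hpos
    · rfl
    · have h : (limit - (seeds.length : Int)).toNat = 0 := by omega
      simp [h]
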